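-- pv_equiv track=rewrite | github.com/aghabidareh/MiniPython | Prime Summations.py | count_prime_sums
-- ===== SOURCE A (Python) =====
-- def sieve_of_eratosthenes(limit):
--     sieve = [True] * (limit + 1)
--     sieve[0] = sieve[1] = False
--     for p in range(2, int(limit**0.5) + 1):
--         if sieve[p]:
--             for i in range(p*p, limit + 1, p):
--                 sieve[i] = False
--     primes = [p for p, is_prime in enumerate(sieve) if is_prime]
--     return primes
--
-- def count_prime_sums(limit, target):
--     primes = sieve_of_eratosthenes(limit)
--     dp = [0] * (limit + 1)
--     dp[0] = 1
--     for p in primes: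
--         for i in range(p, limit + 1):
--             dp[i] += dp[i - p]
--     for i in range(2, limit + 1):
--         if dp[i] > target:
--             return i
--     return -1
-- ===== SOURCE B (Python) =====
-- def sieve_of_eratosthenes(limit):
--     sieve = [True] * (limit + 1)
--     sieve[0] = sieve[1] = False
--     for p in range(2, int(limit**0.5) + 1):
--         if sieve[p]:
--             for i in range(p*p, limit + 1, p):
--                 sieve[i] = False
--     primes = [p for p, is_prime in enumerate(sieve) if is_prime]
--     return primes
--
--
-- def count_prime_sums(limit, target):
--     # Iterative-deepening: run the coin-change table only up to a doubling
--     # bound, returning as soon as the first witness appears; counts for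
--     # amounts <= bound are unaffected by primes > bound.
--     primes = sieve_of_eratosthenes(limit)
--     bound = min(2, limit)
--     while True:
--         dp = [1] + [0] * bound
--         for p in primes:
--             if p <= bound:
--                 new = dp[:p]
--                 for i in range(p, bound + 1):
--                     new.append(dp[i] + new[i - p])
--                 dp = new
--         for i in range(2, bound + 1):
--             if dp[i] > target:
--                 return i
--         if bound >= limit:
--             return -1
--         bound = min(2 * bound, limit)
-- ===== Notes on version B (the rewrite author's own statement) =====
-- stated objective: faster
-- what changed: B replaces A's full (limit x pi(limit)) in-place DP table plus final scan by an iterative-deepening search: it builds a fresh coin-change table only up to a doubling bound (primes above the bound cannot affect counts at or below it) and returns at the first witness, so the work depends on the answer, not on limit.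
import Mathlib
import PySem

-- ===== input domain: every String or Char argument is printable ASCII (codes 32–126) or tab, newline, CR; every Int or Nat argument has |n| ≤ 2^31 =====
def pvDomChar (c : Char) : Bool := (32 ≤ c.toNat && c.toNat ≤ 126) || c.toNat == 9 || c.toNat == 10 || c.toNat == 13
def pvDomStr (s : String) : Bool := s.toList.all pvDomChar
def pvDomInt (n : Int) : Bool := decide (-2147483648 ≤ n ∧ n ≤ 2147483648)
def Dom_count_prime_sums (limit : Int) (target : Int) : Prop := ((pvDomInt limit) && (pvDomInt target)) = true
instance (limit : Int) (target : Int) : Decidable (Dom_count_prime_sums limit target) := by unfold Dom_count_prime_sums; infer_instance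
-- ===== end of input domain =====

-- B replaces A's full DP table + scan by an iterative-deepening (doubling-bound) search that
-- stops at the first witness; measurably faster when the answer is small relative to `limit`.

-- ===== PORT A =====
-- Shared helper: literal transliteration of `sieve_of_eratosthenes`, which is identical in A
-- and in B (Source B).  `int(limit**0.5)` is ported as `Nat.sqrt`, exact for 0 ≤ limit ≤ 2^31
-- (the stated input domain; verified exhaustively near squares).  The enumerate+filter
-- comprehension is ported as a filter over the index range (sieve always has length L+1).
def pySieve (L : Nat) : List Nat :=
  let sieve := ((Array.replicate (L + 1) true).setIfInBounds 0 false).setIfInBounds 1 false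
  let sieve := (List.range' 2 (Nat.sqrt L + 1 - 2)).foldl
    (fun s p =>
      if s.getD p false then
        (List.range' (p * p) ((L + 1 - p * p + p - 1) / p) p).foldl (fun s i => s.setIfInBounds i false) s
      else s) sieve
  (List.range (L + 1)).filter (fun i => sieve.getD i false)

def count_prime_sums (limit : Int) (target : Int) : Int :=
  let L := limit.toNat
  let primes := pySieve L
  let dp := (Array.replicate (L + 1) (0 : Int)).setIfInBounds 0 1
  let dp := primes.foldl (fun dp p =>
    (List.range' p (L + 1 - p)).foldl
      (fun dp i => dp.setIfInBounds i (dp.getD i 0 + dp.getD (i - p) 0)) dp) dp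
  match (List.range' 2 (L - 1)).find? (fun i => dp.getD i 0 > target) with
  | some i => (i : Int)
  | none => -1

-- ===== PORT B =====
-- one pass of Source B's `for p in primes` body at the current bound
def pyDpStep (bound : Nat) (dp : Array Int) (p : Nat) : Array Int :=
  if p ≤ bound then
    (List.range' p (bound + 1 - p)).foldl
      (fun new i => new.push (dp.getD i 0 + new.getD (i - p) 0)) (dp.extract 0 p)
  else dp

-- Source B's `for i in range(2, bound+1): if dp[i] > target: return i`
def pyScan (bound : Nat) (dp : Array Int) (target : Int) : Option Nat :=
  (List.range' 2 (bound - 1)).find? (fun i => dp.getD i 0 > target)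

-- Source B's `while True` doubling loop; the two proof arguments are totality guards only
def pyDeepen (primes : List Nat) (L : Nat) (target : Int) (bound : Nat)
    (hb : 1 ≤ bound) (hbL : bound ≤ L) : Int :=
  match pyScan bound (primes.foldl (pyDpStep bound) (((1 : Int) :: List.replicate bound 0).toArray)) target with
  | some i => (i : Int)
  | none => if h : L ≤ bound then -1
            else pyDeepen primes L target (min (2 * bound) L) (by omega) (by omega)
termination_by L - bound
decreasing_by omega

def count_prime_sums_alt (limit : Int) (target : Int) : Int :=
  if h : limit < 1 then -1  -- totality guard: Python (A and B alike) raises IndexError here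
  else pyDeepen (pySieve limit.toNat) limit.toNat target (min 2 limit.toNat)
        (by omega) (by omega)

-- ===== PRECONDITION & SPEC =====
-- A raises IndexError (sieve[1] on a list of length ≤ 1) whenever limit < 1; Pre_ excludes exactly those inputs.
def Pre_count_prime_sums (limit : Int) (target : Int) : Prop := 1 ≤ limit
instance (limit : Int) (target : Int) : Decidable (Pre_count_prime_sums limit target) := by
  unfold Pre_count_prime_sums; infer_instance

def pvWitness_count_prime_sums : Int × Int := (10, 1)

def Spec_count_prime_sums (limit : Int) (target : Int) (out : Int) : Prop :=
  out = count_prime_sums_alt limit target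
instance (limit : Int) (target : Int) (out : Int) : Decidable (Spec_count_prime_sums limit target out) := by
  unfold Spec_count_prime_sums; infer_instance

-- ===== CLAIM (what is proved, stated in full; the proofs are below) =====
def Claim_equal_count_prime_sums : Prop := ∀ (limit : Int) (target : Int),
  Dom_count_prime_sums limit target → Pre_count_prime_sums limit target →
  Spec_count_prime_sums limit target (count_prime_sums limit target)

-- ===== LEMMAS AND PROOFS =====

-- reference value of one DP pass: g i = f i + (g (i-p) if p ≤ i), the common semantics of
-- A's in-place ascending update and B's fresh-list append update
def refStep (p : Nat) (f : Nat → Int) (i : Nat) : Int :=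
  if h : 1 ≤ p ∧ p ≤ i then f i + refStep p f (i - p) else f i
termination_by i
decreasing_by omega

def pvVal (P : List Nat) (f : Nat → Int) : Nat → Int :=
  P.foldl (fun g p => refStep p g) f

-- dp realises f on indices ≤ n and has length n+1
def DpRel (n : Nat) (dp : Array Int) (f : Nat → Int) : Prop :=
  dp.size = n + 1 ∧ ∀ i, i ≤ n → dp.getD i 0 = f i

theorem refStep_lt {p : Nat} (f : Nat → Int) {i : Nat} (h : i < p) : refStep p f i = f i := by
  rw [refStep]; simp [Nat.not_le.2 h]

theorem refStep_le {p : Nat} (f : Nat → Int) {i : Nat} (h1 : 1 ≤ p) (h2 : p ≤ i) :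
    refStep p f i = f i + refStep p f (i - p) := by
  rw [refStep]; simp [h1, h2]

theorem getD_set_self {α : Type} {l : Array α} {i : Nat} {v d : α} (h : i < l.size) :
    (l.setIfInBounds i v).getD i d = v := by
  simp [Array.getD_eq_getD_getElem?, Array.getElem?_setIfInBounds_self, h]

theorem getD_set_ne {α : Type} {l : Array α} {i j : Nat} {v d : α} (h : i ≠ j) :
    (l.setIfInBounds i v).getD j d = l.getD j d := by
  simp [Array.getD_eq_getD_getElem?, Array.getElem?_setIfInBounds_ne h]

-- A's inner loop, tail-generalised
theorem stepA_aux (L p : Nat) (f : Nat → Int) (hp : 1 ≤ p) :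
    ∀ (cnt j : Nat) (dp : Array Int), dp.size = L + 1 → j + cnt = L + 1 → p ≤ j →
    (∀ i, i < j → i ≤ L → dp.getD i 0 = refStep p f i) →
    (∀ i, j ≤ i → i ≤ L → dp.getD i 0 = f i) →
    DpRel L ((List.range' j cnt).foldl
      (fun dp i => dp.setIfInBounds i (dp.getD i 0 + dp.getD (i - p) 0)) dp) (refStep p f) := by
  intro cnt
  induction cnt with
  | zero =>
    intro j dp hlen hcj hpj hlow hhigh
    exact ⟨hlen, fun i hi => hlow i (by omega) hi⟩
  | succ n ih =>
    intro j dp hlen hcj hpj hlow hhigh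
    have hjL : j ≤ L := by omega
    rw [List.range'_succ, List.foldl_cons]
    refine ih (j + 1) _ (by simp [Array.size_setIfInBounds, hlen]) (by omega) (by omega) ?_ ?_
    · intro i hi hiL
      by_cases hij : i = j
      · rw [hij, getD_set_self (by omega)]
        have h1 : dp.getD j 0 = f j := hhigh j le_rfl hjL
        have h2 : dp.getD (j - p) 0 = refStep p f (j - p) := hlow _ (by omega) (by omega)
        rw [h1, h2, refStep_le f hp hpj]
      · rw [getD_set_ne (by omega)]
        exact hlow i (by omega) hiL
    · intro i hi hiL
      rw [getD_set_ne (by omega)]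
      exact hhigh i (by omega) hiL

theorem stepA_rel (L p : Nat) (f : Nat → Int) (dp : Array Int) (hp : 1 ≤ p) (hpL : p ≤ L)
    (hrel : DpRel L dp f) :
    DpRel L ((List.range' p (L + 1 - p)).foldl
      (fun dp i => dp.setIfInBounds i (dp.getD i 0 + dp.getD (i - p) 0)) dp) (refStep p f) := by
  refine stepA_aux L p f hp (L + 1 - p) p dp hrel.1 (by omega) le_rfl ?_ ?_
  · intro i hi hiL
    rw [refStep_lt f hi]
    exact hrel.2 i hiL
  · intro i _ hiL
    exact hrel.2 i hiL

theorem getD_push_lt {l : Array Int} {i : Nat} {v : Int} (h : i < l.size) :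
    (l.push v).getD i 0 = l.getD i 0 := by
  simp [Array.getD_eq_getD_getElem?, Array.getElem?_push, Nat.ne_of_lt h]

-- B's inner loop, tail-generalised
theorem stepB_aux (b p : Nat) (f : Nat → Int) (dp : Array Int) (hp : 1 ≤ p)
    (hrel : DpRel b dp f) :
    ∀ (cnt j : Nat) (new : Array Int), new.size = j → p ≤ j → j + cnt = b + 1 →
    (∀ i, i < j → new.getD i 0 = refStep p f i) →
    DpRel b ((List.range' j cnt).foldl
      (fun new i => new.push (dp.getD i 0 + new.getD (i - p) 0)) new) (refStep p f) := by
  intro cnt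
  induction cnt with
  | zero =>
    intro j new hlen hpj hcnt hlow
    rw [List.range'_zero, List.foldl_nil]
    exact ⟨by omega, fun i hi => hlow i (by omega)⟩
  | succ n ih =>
    intro j new hlen hpj hcnt hlow
    rw [List.range'_succ, List.foldl_cons]
    refine ih (j + 1) _ (by simp [Array.size_push, hlen]) (by omega) (by omega) ?_
    intro i hi
    by_cases hij : i = j
    · subst hij
      have hgd : (new.push (dp.getD i 0 + new.getD (i - p) 0)).getD i 0
          = dp.getD i 0 + new.getD (i - p) 0 := by
        rw [Array.getD_eq_getD_getElem?, Array.getElem?_push, if_pos hlen.symm]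
        rfl
      rw [hgd, hrel.2 i (by omega), hlow (i - p) (by omega), refStep_le f hp hpj]
    · rw [getD_push_lt (by omega)]
      exact hlow i (by omega)

theorem stepB_rel (b p : Nat) (f : Nat → Int) (dp : Array Int) (hp : 1 ≤ p)
    (hrel : DpRel b dp f) : DpRel b (pyDpStep b dp p) (refStep p f) := by
  unfold pyDpStep
  by_cases hpb : p ≤ b
  · simp only [hpb, if_true]
    refine stepB_aux b p f dp hp hrel (b + 1 - p) p (dp.extract 0 p)
      (by simp [Array.size_extract, hrel.1]; omega) le_rfl (by omega) ?_
    intro i hi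
    rw [refStep_lt f hi]
    have : (dp.extract 0 p).getD i 0 = dp.getD i 0 := by
      rw [Array.getD_eq_getD_getElem?, Array.getElem?_extract,
        if_pos (by simp [hrel.1]; omega), Nat.zero_add, ← Array.getD_eq_getD_getElem?]
    rw [this]
    exact hrel.2 i (by omega)
  · simp only [hpb, if_false]
    exact ⟨hrel.1, fun i hi => by
      rw [refStep_lt f (by omega)]; exact hrel.2 i hi⟩

-- generic: folding steps that each realise refStep realises pvVal
theorem fold_rel (n : Nat) (step : Array Int → Nat → Array Int) :
    ∀ (P : List Nat) (dp : Array Int) (f : Nat → Int),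
    (∀ p ∈ P, ∀ dp f, DpRel n dp f → DpRel n (step dp p) (refStep p f)) →
    DpRel n dp f → DpRel n (P.foldl step dp) (pvVal P f) := by
  intro P
  induction P with
  | nil => intro dp f _ h; simpa [pvVal] using h
  | cons p P ih =>
    intro dp f hstep hrel
    simp only [List.foldl_cons, pvVal] at *
    exact ih _ _ (fun q hq => hstep q (by simp [hq])) (hstep p (by simp) dp f hrel)

-- the sieve never yields 0
theorem foldl_preserve {α β : Type} (P : α → Prop) (step : α → β → α)
    (h : ∀ a b, P a → P (step a b)) : ∀ (l : List β) (a : α), P a → P (l.foldl step a) := by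
  intro l
  induction l with
  | nil => intro a ha; simpa using ha
  | cons x xs ih => intro a ha; exact ih _ (h a x ha)

theorem set_false_preserve (s : Array Bool) (i : Nat) (h : s.getD 0 false = false) :
    (s.setIfInBounds i false).getD 0 false = false := by
  by_cases hi : i = 0
  · subst hi
    by_cases h0 : 0 < s.size
    · rw [getD_set_self h0]
    · rw [Array.getD_eq_getD_getElem?, Array.getElem?_setIfInBounds_self,
        if_neg (by omega)]
      rfl
  · rw [getD_set_ne hi]
    exact h

theorem sieve_pos (L : Nat) : ∀ p ∈ pySieve L, 1 ≤ p := by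
  intro p hp
  unfold pySieve at hp
  simp only [List.mem_filter, List.mem_range] at hp
  obtain ⟨hpL, hpt⟩ := hp
  by_contra hc
  have hp0 : p = 0 := by omega
  subst hp0
  have hz : ∀ s : Array Bool, s.getD 0 false = false →
      ((List.range' 2 (Nat.sqrt L + 1 - 2)).foldl
        (fun s p =>
          if s.getD p false then
            (List.range' (p * p) ((L + 1 - p * p + p - 1) / p) p).foldl
              (fun s i => s.setIfInBounds i false) s
          else s) s).getD 0 false = false := by
    intro s hs
    refine foldl_preserve (fun (s : Array Bool) => s.getD 0 false = false) _ ?_ _ _ hs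
    intro a b ha
    by_cases hb : a.getD b false
    · simp only [hb, if_true]
      exact foldl_preserve (fun (s : Array Bool) => s.getD 0 false = false)
        (fun s i => s.setIfInBounds i false) (fun s i => set_false_preserve s i) _ a ha
    · simp only [hb]
      simpa using ha
  have h0 : (((Array.replicate (L + 1) true).setIfInBounds 0 false).setIfInBounds 1 false).getD 0 false = false := by
    rw [getD_set_ne (by omega : (1:Nat) ≠ 0), getD_set_self (by simp)]
  rw [hz _ h0] at hpt
  simp at hpt

theorem sieve_le (L : Nat) : ∀ p ∈ pySieve L, p ≤ L := by
  intro p hp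
  unfold pySieve at hp
  simp only [List.mem_filter, List.mem_range] at hp
  omega

-- predicates agreeing on members find the same element
theorem find?_congr' {l : List Nat} {p q : Nat → Bool} (h : ∀ x ∈ l, p x = q x) :
    l.find? p = l.find? q := by
  induction l with
  | nil => simp
  | cons x xs ih =>
    simp only [List.find?_cons]
    rw [h x (by simp)]
    cases q x with
    | true => rfl
    | false => exact ih (fun y hy => h y (by simp [hy]))

theorem find?_append_some {l l' : List Nat} {p : Nat → Bool} {x : Nat}
    (h : l.find? p = some x) : (l ++ l').find? p = some x := by
  rw [List.find?_append, h]; rfl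

-- the common initial dp realises the base function
def baseF : Nat → Int := fun i => if i = 0 then 1 else 0

theorem base_relA (L : Nat) : DpRel L ((Array.replicate (L + 1) (0 : Int)).setIfInBounds 0 1) baseF := by
  refine ⟨by simp, ?_⟩
  intro i _
  by_cases hi : i = 0
  · subst hi
    rw [getD_set_self (by simp)]
    rfl
  · rw [getD_set_ne (fun h => hi h.symm)]
    simp [Array.getD_eq_getD_getElem?, Array.getElem?_replicate, baseF, hi]
    split <;> rfl

theorem base_relB (b : Nat) : DpRel b (((1 : Int) :: List.replicate b 0).toArray) baseF := by
  refine ⟨by simp, ?_⟩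
  intro i _
  cases i with
  | zero => rfl
  | succ n =>
    simp [Array.getD_eq_getD_getElem?, List.getElem?_toArray,
      List.getElem?_cons_succ, List.getElem?_replicate, baseF]
    split <;> rfl

theorem dpA_rel (L : Nat) :
    DpRel L ((pySieve L).foldl (fun dp p =>
      (List.range' p (L + 1 - p)).foldl
        (fun dp i => dp.setIfInBounds i (dp.getD i 0 + dp.getD (i - p) 0)) dp)
      ((Array.replicate (L + 1) (0 : Int)).setIfInBounds 0 1)) (pvVal (pySieve L) baseF) := by
  refine fold_rel L _ (pySieve L) _ baseF ?_ (base_relA L)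
  intro p hp dp f hrel
  exact stepA_rel L p f dp (sieve_pos L p hp) (sieve_le L p hp) hrel

theorem dpB_rel (primes : List Nat) (b : Nat) (hpos : ∀ p ∈ primes, 1 ≤ p) :
    DpRel b (primes.foldl (pyDpStep b) (((1 : Int) :: List.replicate b 0).toArray))
      (pvVal primes baseF) := by
  refine fold_rel b _ primes _ baseF ?_ (base_relB b)
  intro p hp dp f hrel
  exact stepB_rel b p f dp (hpos p hp) hrel

-- scans over a dp realising V scan V itself
theorem scan_congr (b : Nat) (dp : Array Int) (V : Nat → Int) (target : Int)
    (h : ∀ i, i ≤ b → dp.getD i 0 = V i) :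
    (List.range' 2 (b - 1)).find? (fun i => dp.getD i 0 > target)
      = (List.range' 2 (b - 1)).find? (fun i => V i > target) := by
  apply find?_congr'
  intro x hx
  rw [List.mem_range'_1] at hx
  rw [h x (by omega)]

-- the deepening loop returns the global first witness
theorem deepen_eq (primes : List Nat) (L : Nat) (target : Int)
    (hpos : ∀ p ∈ primes, 1 ≤ p) :
    ∀ (k b : Nat) (hb : 1 ≤ b) (hbL : b ≤ L), L - b ≤ k →
    pyDeepen primes L target b hb hbL =
      (match (List.range' 2 (L - 1)).find? (fun i => pvVal primes baseF i > target) with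
       | some i => (i : Int)
       | none => -1) := by
  intro k
  induction k with
  | zero =>
    intro b hb hbL hk
    have hbL' : b = L := by omega
    subst hbL'
    rw [pyDeepen]
    unfold pyScan
    rw [scan_congr b _ (pvVal primes baseF) target (dpB_rel primes b hpos).2]
    cases hF : (List.range' 2 (b - 1)).find? (fun i => pvVal primes baseF i > target) with
    | some i => simp [hF]
    | none => simp [hF]
  | succ n ih =>
    intro b hb hbL hk
    rw [pyDeepen]
    unfold pyScan
    rw [scan_congr b _ (pvVal primes baseF) target (dpB_rel primes b hpos).2]
    have hsplit : List.range' 2 (b - 1) ++ List.range' (b + 1) (L - b) = List.range' 2 (L - 1) := by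
      have h1 : (2 : Nat) + 1 * (b - 1) = b + 1 := by omega
      have h2 : (b - 1) + (L - b) = L - 1 := by omega
      rw [← h2, ← List.range'_append, h1]
    cases hF : (List.range' 2 (b - 1)).find? (fun i => pvVal primes baseF i > target) with
    | some i =>
      have : (List.range' 2 (L - 1)).find? (fun i => pvVal primes baseF i > target) = some i := by
        rw [← hsplit]
        exact find?_append_some hF
      simp [this]
    | none =>
      by_cases hLb : L ≤ b
      · have hbL' : b = L := by omega
        subst hbL'
        simp only [hF, dif_pos hLb]
      · simp only [hF, dif_neg hLb]
        exact ih (min (2 * b) L) (by omega) (by omega) (by omega)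

-- ===== VERDICT (by name: the statement is the Claim_ definition above) =====
theorem count_prime_sums_spec : Claim_equal_count_prime_sums := by
  unfold Claim_equal_count_prime_sums Spec_count_prime_sums Pre_count_prime_sums
  intro limit target _ hpre
  have hL : 1 ≤ limit.toNat := by omega
  simp only [count_prime_sums, count_prime_sums_alt]
  rw [dif_neg (by omega : ¬ limit < 1)]
  rw [deepen_eq (pySieve limit.toNat) limit.toNat target (sieve_pos limit.toNat)
    limit.toNat (min 2 limit.toNat) (by omega) (by omega) (by omega)]
  rw [scan_congr limit.toNat _ (pvVal (pySieve limit.toNat) baseF) target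
    (dpA_rel limit.toNat).2]
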